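-- pv_equiv track=rewrite | github.com/i12lanob/codigosCriptografia | practica2.py | knapsackcipher
-- ===== SOURCE A (Python) =====
-- def TextToNumber(texto):
--
--     texto = texto.upper()  # Convertir el texto a mayúsculas para facilitar el mapeo
--     cadena_numerica = []
--
--     for char in texto:
--         if 'A' <= char <= 'Z':  # Solo considerar letras
--             var=letter2ascii(char) # Llamar a la función que transforme la letra en ASCII
--             cadena_numerica.append(var)
--
--     return cadena_numerica
--
-- def NumberToBinario(texto_numerico):
--     vector_binario = []
--
--     for num in texto_numerico:
--         #Transformar a binario. En este caso un número binario (b) de 8 caracteres y rellenar con 0 (a la izquierda)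
--         binario = format(num, '08b') #format permite especificar el formato.
--         vector_binario.append(binario)
--
--     return vector_binario
--
-- def letter2ascii(letra):
--     letra = letra.upper()
--     letra = ord(letra) # Transformar de letra a ASCII
--
--     return letra
--
-- def knapsackcipher(vector, texto):
--     texto_numerico = TextToNumber(texto) # Convertir el texto a codigo ASCII
--
--     binario = NumberToBinario(texto_numerico) # Convertir ASCII a binario
--
--     # Unir todos los binarios en una sola cadena
--     cadena_binaria = ''.join(binario) # Unir los valores binarios en una única cadena
--
--     cadena = []
--     # range (start, stop, step)
--     # Primer valor--> valor de inicio.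
--     # Segundo valor--> límite superior.
--     # Tercer valor--> tamaño del paso.
--     for i in range(0, len(cadena_binaria), len(vector)):
--         cadena_dividida = [] # Para dividir la cadena binaria en bloques según el tamaño del vector
--
--         # Llenar el bloque hasta alcanzar el tamaño del vector
--         for j in range(len(vector)):
--             if i + j < len(cadena_binaria):  # Asegurarse de no exceder la longitud del vector
--                 cadena_dividida.append(cadena_binaria[i + j])
--             else:
--                 cadena_dividida.append('1')  # Si el bloque es más pequeño rellenar con 1
--
--         cadena.append(''.join(cadena_dividida)) # Para que en el vector no quede como ['0', '1', '1', '0'], sino como ['0110']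
--
--     resultado = []
--
--     for i in cadena: # Recorrer la cadena generada con los números binarios divididos en bloques
--         suma = 0
--         for j,  bit in enumerate(i): # enumerate da tanto el índice como el valor
--             if bit == '1': # Si el valor del bit es 1 sumamos el valor
--                 suma += vector[j]
--
--         resultado.append(suma)
--
--     return resultado
-- ===== SOURCE B (Python) =====
-- def knapsackcipher(vector, texto):
--     # One fused pass: build the bit string, then accumulate block subset-sums
--     # directly by index, instead of materialising padded block strings first.
--     bits = ''.join(format(ord(c), '08b') for c in texto.upper() if 'A' <= c <= 'Z')
--     k = len(vector)
--     n = len(bits)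
--     nblocks = -(-n // k)  # ceil(n / k)
--     resultado = []
--     suma = 0
--     for i in range(k * nblocks):
--         bit = bits[i] if i < n else '1'
--         if bit == '1':
--             suma += vector[i % k]
--         if i % k == k - 1:
--             resultado.append(suma)
--             suma = 0
--     return resultado
-- ===== Notes on version B (the rewrite author's own statement) =====
-- stated objective: alternative
-- what changed: B fuses A's two phases (materialise padded block strings, then re-scan each block with enumerate) into a single indexed pass over the bit string that accumulates each block's subset-sum with a running total and i%k bookkeeping, never building the block strings.
import Mathlib
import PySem

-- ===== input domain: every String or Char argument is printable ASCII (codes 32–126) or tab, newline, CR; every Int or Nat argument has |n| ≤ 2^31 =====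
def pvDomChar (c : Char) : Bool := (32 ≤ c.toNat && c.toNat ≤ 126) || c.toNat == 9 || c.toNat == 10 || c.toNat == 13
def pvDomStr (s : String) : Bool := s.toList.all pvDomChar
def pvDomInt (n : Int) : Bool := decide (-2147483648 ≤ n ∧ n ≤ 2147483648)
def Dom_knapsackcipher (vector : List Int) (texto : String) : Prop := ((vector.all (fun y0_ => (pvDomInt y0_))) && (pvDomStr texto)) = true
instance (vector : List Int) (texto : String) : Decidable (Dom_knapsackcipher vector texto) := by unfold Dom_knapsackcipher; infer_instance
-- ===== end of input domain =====

-- B fuses A's two phases (build padded block strings, then re-scan each block) into one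
-- indexed pass with a running block sum; same O(n) cost, different decomposition ("alternative").

-- ===== PORT A =====
-- format(n, '08b'): binary digits left-padded with '0' to width 8; exact for 0 ≤ n (all
-- inputs here are ord of 'A'..'Z').
def pvFormat08b (n : Int) : List Char :=
  let b := PySem.Int.toBinChars n
  List.replicate (8 - b.length) '0' ++ b

def pvLetter2ascii (letra : Char) : Int :=
  ((PySem.Chars.upperChar letra).toNat : Int)

def pvTextToNumber (texto : String) : List Int :=
  (PySem.Chars.upper texto.toList).foldl
    (fun acc c => if 'A' ≤ c ∧ c ≤ 'Z' then acc ++ [pvLetter2ascii c] else acc) []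

def pvNumberToBinario (nums : List Int) : List (List Char) :=
  nums.foldl (fun acc n => acc ++ [pvFormat08b n]) []

def knapsackcipher (vector : List Int) (texto : String) : List Int :=
  let texto_numerico := pvTextToNumber texto
  let binario := pvNumberToBinario texto_numerico
  let cadena_binaria : List Char := binario.foldl (fun acc b => acc ++ b) []
  let L : Int := cadena_binaria.length
  let k : Int := vector.length
  let cadena : List (List Char) :=
    (PySem.List.pyRange 0 L k).foldl (fun cad i =>
      let cadena_dividida : List Char :=
        (PySem.List.pyRange 0 k 1).foldl (fun bl j =>
          if i + j < L then bl ++ [PySem.List.pyGetD cadena_binaria (i + j) '0']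
          else bl ++ ['1']) []
      cad ++ [cadena_dividida]) []
  let resultado : List Int :=
    cadena.foldl (fun res blk =>
      let suma : Int := (PySem.List.enumerate blk).foldl
        (fun suma p => if p.2 = '1' then suma + PySem.List.pyGetD vector p.1 0 else suma) 0
      res ++ [suma]) []
  resultado

-- ===== PORT B =====
def knapsackcipher_alt (vector : List Int) (texto : String) : List Int :=
  let bits : List Char :=
    ((PySem.Chars.upper texto.toList).filter (fun c => decide ('A' ≤ c ∧ c ≤ 'Z'))).flatMap
      (fun c => pvFormat08b ((c.toNat : Int)))
  let k : Int := vector.length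
  let n : Int := bits.length
  let nblocks : Int := -(PySem.Int.floordiv (-n) k)
  let st : List Int × Int :=
    (PySem.List.pyRange 0 (k * nblocks) 1).foldl
      (fun (st : List Int × Int) i =>
        let bit : Char := if i < n then PySem.List.pyGetD bits i '0' else '1'
        let suma : Int :=
          if bit = '1' then st.2 + PySem.List.pyGetD vector (PySem.Int.mod i k) 0 else st.2
        if PySem.Int.mod i k = k - 1 then (st.1 ++ [suma], (0 : Int)) else (st.1, suma))
      ([], 0)
  st.1

-- ===== PRECONDITION & SPEC =====
-- Pre_ excludes vector = [] only: there A's range(0, len, 0) raises ValueError (B's ceil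
-- division raises ZeroDivisionError), so A returns no value on those inputs.
def Pre_knapsackcipher (vector : List Int) (texto : String) : Prop := vector ≠ []
instance (vector : List Int) (texto : String) : Decidable (Pre_knapsackcipher vector texto) := by
  unfold Pre_knapsackcipher; infer_instance
def pvWitness_knapsackcipher : List Int × String := ([1, 2, 4], "Hi")

def Spec_knapsackcipher (vector : List Int) (texto : String) (out : List Int) : Prop := out = knapsackcipher_alt vector texto
instance (vector : List Int) (texto : String) (out : List Int) : Decidable (Spec_knapsackcipher vector texto out) := by unfold Spec_knapsackcipher; infer_instance

-- ===== CLAIM (what is proved, stated in full; the proofs are below) =====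
def Claim_equal_knapsackcipher : Prop := ∀ (vector : List Int) (texto : String), Dom_knapsackcipher vector texto → Pre_knapsackcipher vector texto → Spec_knapsackcipher vector texto (knapsackcipher vector texto)

-- ===== LEMMAS AND PROOFS =====

-- the j-th bit of the (padded-with-'1') stream over s
def pvBitC (s : List Char) (j : Nat) : Char := if j < s.length then s.getD j '0' else '1'
def pvContrib (vector : List Int) (s : List Char) (j : Nat) : Int :=
  if pvBitC s j = '1' then vector.getD j 0 else 0
def pvBlockVal (vector : List Int) (s : List Char) : Int :=
  ((List.range vector.length).map (pvContrib vector s)).sum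

def pvSpec (vector : List Int) (s : List Char) : List Int :=
  if h : s = [] ∨ vector = [] then []
  else pvBlockVal vector s :: pvSpec vector (s.drop vector.length)
termination_by s.length
decreasing_by
  push Not at h
  have h1 : s.length ≠ 0 := fun hl => h.1 (List.eq_nil_of_length_eq_zero hl)
  have h2 : vector.length ≠ 0 := fun hl => h.2 (List.eq_nil_of_length_eq_zero hl)
  simp [List.length_drop]; omega

-- ---- shared small lemmas ----
theorem pvUpperFix (c : Char) (h2 : c ≤ 'Z') : PySem.Chars.upperChar c = c := by
  have h : PySem.Chars.islower c = false := by
    simp only [PySem.Chars.islower, Bool.and_eq_false_iff, decide_eq_false_iff_not]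
    left
    intro hc
    have h2' : c.toNat ≤ 90 := h2
    have hc' : 97 ≤ c.toNat := hc
    omega
  simp [PySem.Chars.upperChar, h]

theorem pvGetD_drop (l : List Char) (i j : Nat) (d : Char) :
    (l.drop i).getD j d = l.getD (i + j) d := by
  simp [List.getD_eq_getElem?_getD, List.getElem?_drop]

def pvBits (texto : String) : List Char :=
  ((PySem.Chars.upper texto.toList).filter
    (fun c => decide ('A' ≤ c ∧ c ≤ 'Z'))).flatMap (fun c => pvFormat08b ((c.toNat : Int)))

theorem pvBitsEq (texto : String) :
    (pvNumberToBinario (pvTextToNumber texto)).foldl (fun acc b => acc ++ b) [] = pvBits texto := by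
  unfold pvNumberToBinario pvTextToNumber pvBits
  have h1 : (fun (acc : List Int) (c : Char) => if 'A' ≤ c ∧ c ≤ 'Z' then acc ++ [pvLetter2ascii c] else acc)
      = (fun acc c => if (fun c => decide ('A' ≤ c ∧ c ≤ 'Z')) c = true then acc ++ [pvLetter2ascii c] else acc) := by
    funext acc c; simp
  rw [h1, PySem.List.foldl_append_if, PySem.List.foldl_append_singleton_eq_map,
      PySem.List.foldl_append_eq_flatten]
  simp only [List.nil_append, List.map_map, ← List.flatMap_def]
  apply List.flatMap_congr
  intro c hc
  simp only [List.mem_filter, decide_eq_true_eq] at hc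
  simp [Function.comp, pvLetter2ascii, pvUpperFix c hc.2.2]

-- ---- B side ----
def pvBody (vector : List Int) (s : List Char) : List Int × Int → Int → List Int × Int :=
  fun st i =>
    let bit : Char := if i < (s.length : Int) then PySem.List.pyGetD s i '0' else '1'
    let suma : Int :=
      if bit = '1' then st.2 + PySem.List.pyGetD vector (PySem.Int.mod i (vector.length : Int)) 0 else st.2
    if PySem.Int.mod i (vector.length : Int) = (vector.length : Int) - 1 then (st.1 ++ [suma], (0 : Int))
    else (st.1, suma)

theorem pvBody_small (vector : List Int) (s : List Char) (st : List Int × Int) (t : Nat)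
    (ht : t < vector.length) :
    pvBody vector s st (t : Int) =
      if t = vector.length - 1 then (st.1 ++ [st.2 + pvContrib vector s t], 0)
      else (st.1, st.2 + pvContrib vector s t) := by
  have hmod : PySem.Int.mod (t : Int) (vector.length : Int) = (t : Int) := by
    rw [PySem.Int.mod_natCast]
    congr 1
    exact Nat.mod_eq_of_lt ht
  have hbit' : (if (t : Int) < (s.length : Int) then s.getD t '0' else '1') = pvBitC s t := by
    have hlt : ((t : Int) < (s.length : Int)) ↔ t < s.length := by omega
    simp only [pvBitC, hlt]
  simp only [pvBody, hmod, PySem.List.pyGetD_natCast]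
  have hiff : ((t : Int) = (vector.length : Int) - 1) ↔ (t = vector.length - 1) := by omega
  simp only [hbit', hiff]
  by_cases hb : pvBitC s t = '1' <;> simp [pvContrib, hb]

theorem pvBpartial (vector : List Int) (s : List Char) :
    ∀ (j : Nat), j ≤ vector.length - 1 → ∀ (res : List Int) (a : Int),
      (PySem.List.pyRange 0 (j : Int) 1).foldl (pvBody vector s) (res, a) =
        (res, a + ((List.range j).map (pvContrib vector s)).sum) := by
  intro j
  induction j with
  | zero => intro _ res a; simp [PySem.List.pyRange_one_eq_nil]
  | succ j ih =>
    intro hj res a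
    have hle : (0:Int) ≤ (j:Int) := by omega
    have : ((j+1 : Nat) : Int) = (j : Int) + 1 := by omega
    rw [this, PySem.List.pyRange_one_succ_right hle, List.foldl_append, ih (by omega)]
    simp only [List.foldl_cons, List.foldl_nil]
    rw [pvBody_small vector s _ j (by omega)]
    have hne : ¬ (j = vector.length - 1) := by omega
    simp [hne, List.range_succ, add_assoc]

theorem pvBblock (vector : List Int) (s : List Char) (hk : vector ≠ []) (res : List Int) :
    (PySem.List.pyRange 0 (vector.length : Int) 1).foldl (pvBody vector s) (res, 0) =
      (res ++ [pvBlockVal vector s], 0) := by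
  have hk' : 0 < vector.length := List.length_pos_of_ne_nil hk
  have hsplit : (vector.length : Int) = ((vector.length - 1 : Nat) : Int) + 1 := by omega
  rw [hsplit, PySem.List.pyRange_one_succ_right (by omega), List.foldl_append,
      pvBpartial vector s (vector.length - 1) le_rfl res 0]
  simp only [List.foldl_cons, List.foldl_nil]
  have : ((vector.length - 1 : Nat) : Int) = ((vector.length - 1 : Nat) : Int) := rfl
  rw [pvBody_small vector s _ (vector.length - 1) (by omega)]
  have hbv : pvBlockVal vector s =
      ((List.range (vector.length - 1)).map (pvContrib vector s)).sum + pvContrib vector s (vector.length - 1) := by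
    unfold pvBlockVal
    conv_lhs => rw [show vector.length = (vector.length - 1) + 1 by omega]
    rw [List.range_succ]
    simp
  simp [hbv]

theorem pvBshift (vector : List Int) (s : List Char) (M : Int) (st : List Int × Int) :
    (PySem.List.pyRange (vector.length : Int) ((vector.length : Int) + M) 1).foldl (pvBody vector s) st =
      (PySem.List.pyRange 0 M 1).foldl (pvBody vector (s.drop vector.length)) st := by
  rw [PySem.List.pyRange_one, PySem.List.pyRange_one]
  have hlen : ((vector.length : Int) + M - (vector.length : Int)).toNat = (M - 0).toNat := by omega
  rw [hlen, List.foldl_map, List.foldl_map]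
  congr 1
  funext st' t
  show pvBody vector s st' ((vector.length : Int) + (t : Int)) = pvBody vector (s.drop vector.length) st' (0 + (t : Int))
  have e1 : (vector.length : Int) + (t : Int) = ((vector.length + t : Nat) : Int) := by omega
  have e2 : (0 : Int) + (t : Int) = ((t : Nat) : Int) := by omega
  rw [e1, e2]
  simp only [pvBody, PySem.List.pyGetD_natCast, PySem.Int.mod_natCast, List.length_drop]
  have hmod : (vector.length + t) % vector.length = t % vector.length := by
    simp [Nat.add_mod_left]
  have hbitc : (((vector.length + t : Nat) : Int) < (s.length : Int)) ↔ ((t : Int) < ((s.length - vector.length : Nat) : Int)) := by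
    omega
  have hgd : s.getD (vector.length + t) '0' = (s.drop vector.length).getD t '0' := by
    rw [pvGetD_drop]
  rw [hmod, hgd]
  simp only [hbitc]

theorem pvDvdSmall (k M : Int) (hk : 0 < k) (h0 : 0 ≤ M) (h1 : M < k) (hdvd : k ∣ M) : M = 0 := by
  obtain ⟨t, rfl⟩ := hdvd
  rcases lt_trichotomy t 0 with h | h | h
  · nlinarith
  · simp [h]
  · nlinarith

theorem pvBmain (vector : List Int) (hk : vector ≠ []) :
    ∀ (N : Nat) (s : List Char), s.length ≤ N → ∀ (M : Int) (res : List Int),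
      (vector.length : Int) ∣ M → (s.length : Int) ≤ M → M < (s.length : Int) + (vector.length : Int) →
      (PySem.List.pyRange 0 M 1).foldl (pvBody vector s) (res, 0) = (res ++ pvSpec vector s, 0) := by
  have hk' : 0 < vector.length := List.length_pos_of_ne_nil hk
  intro N
  induction N with
  | zero =>
    intro s hs M res hdvd hM1 hM2
    have hsnil : s = [] := List.eq_nil_of_length_eq_zero (by omega)
    subst hsnil
    have hkI : (0:Int) < (vector.length : Int) := by exact_mod_cast hk'
    have hM0 : M = 0 := pvDvdSmall _ _ hkI (by simpa using hM1) (by simpa using hM2) hdvd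
    subst hM0
    simp [PySem.List.pyRange_one_eq_nil, pvSpec]
  | succ N ih =>
    intro s hs M res hdvd hM1 hM2
    by_cases hsnil : s = []
    · subst hsnil
      have hkI : (0:Int) < (vector.length : Int) := by exact_mod_cast hk'
      have hM0 : M = 0 := pvDvdSmall _ _ hkI (by simpa using hM1) (by simpa using hM2) hdvd
      subst hM0
      simp [PySem.List.pyRange_one_eq_nil, pvSpec]
    · have hlen : 0 < s.length := List.length_pos_of_ne_nil hsnil
      have hMpos : 0 < M := by omega
      have hkM : (vector.length : Int) ≤ M := Int.le_of_dvd hMpos hdvd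
      rw [PySem.List.pyRange_one_append 0 (vector.length : Int) M (by omega) hkM, List.foldl_append,
          pvBblock vector s hk res]
      have hMsplit : M = (vector.length : Int) + (M - (vector.length : Int)) := by omega
      rw [hMsplit, pvBshift vector s (M - (vector.length : Int))]
      have hdvd' : (vector.length : Int) ∣ M - (vector.length : Int) := by
        exact dvd_sub hdvd dvd_rfl
      by_cases hcase : vector.length ≤ s.length
      · rw [ih (s.drop vector.length) (by simp [List.length_drop]; omega) _ _ hdvd'
              (by simp [List.length_drop]; omega) (by simp [List.length_drop]; omega)]
        have : pvSpec vector s = pvBlockVal vector s :: pvSpec vector (s.drop vector.length) := by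
          rw [pvSpec]; simp [hsnil, hk]
        rw [this]
        simp
      · -- s.length < vector.length : the single final padded block
        have hdrop : s.drop vector.length = [] := by
          simp [List.drop_eq_nil_iff]; omega
        rw [ih (s.drop vector.length) (by simp [List.length_drop]; omega) _ _ hdvd'
              (by simp [hdrop]; omega) (by simp [hdrop]; omega)]
        have : pvSpec vector s = pvBlockVal vector s :: pvSpec vector (s.drop vector.length) := by
          rw [pvSpec]; simp [hsnil, hk]
        rw [this, hdrop]
        simp [pvSpec]

-- ---- A side ----
theorem pvAblock_map (vector : List Int) (s : List Char) (i : Int) :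
    (PySem.List.pyRange 0 (vector.length : Int) 1).foldl
      (fun bl j => if i + j < (s.length : Int) then bl ++ [PySem.List.pyGetD s (i + j) '0'] else bl ++ ['1']) [] =
    (PySem.List.pyRange 0 (vector.length : Int) 1).map
      (fun j => if i + j < (s.length : Int) then PySem.List.pyGetD s (i + j) '0' else '1') := by
  have hf : (fun (bl : List Char) (j : Int) =>
        if i + j < (s.length : Int) then bl ++ [PySem.List.pyGetD s (i + j) '0'] else bl ++ ['1'])
      = fun bl j => bl ++ [if i + j < (s.length : Int) then PySem.List.pyGetD s (i + j) '0' else '1'] := by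
    funext bl j; split <;> rfl
  rw [hf, PySem.List.foldl_append_singleton_eq_map]
  simp

theorem pvEnumerate_map (g : Int → Char) : ∀ (m : Nat) (a : Int),
    PySem.List.enumerate ((PySem.List.pyRange a (a + (m : Int)) 1).map g) a =
      (PySem.List.pyRange a (a + (m : Int)) 1).map (fun i => (i, g i)) := by
  intro m
  induction m with
  | zero => intro a; simp [PySem.List.pyRange_one_eq_nil]
  | succ m ih =>
    intro a
    have hcons : PySem.List.pyRange a (a + ((m + 1 : Nat) : Int)) 1
        = a :: PySem.List.pyRange (a + 1) (a + ((m + 1 : Nat) : Int)) 1 :=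
      PySem.List.pyRange_one_cons (by omega)
    rw [hcons]
    simp only [List.map_cons, PySem.List.enumerate_cons]
    have he : a + ((m + 1 : Nat) : Int) = (a + 1) + (m : Int) := by push_cast; ring
    rw [he, ih (a + 1)]

theorem pvEnumerate_map0 (g : Int → Char) (m : Nat) :
    PySem.List.enumerate ((PySem.List.pyRange 0 (m : Int) 1).map g) =
      (PySem.List.pyRange 0 (m : Int) 1).map (fun i => (i, g i)) := by
  have h := pvEnumerate_map g m 0
  simpa using h

theorem pvAsum (vector : List Int) (g : Int → Char) (m : Nat) :
    (PySem.List.enumerate ((PySem.List.pyRange 0 (m : Int) 1).map g)).foldl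
      (fun suma p => if p.2 = '1' then suma + PySem.List.pyGetD vector p.1 0 else suma) 0 =
    ((PySem.List.pyRange 0 (m : Int) 1).map
      (fun i => if g i = '1' then PySem.List.pyGetD vector i 0 else 0)).sum := by
  rw [pvEnumerate_map0, List.foldl_map]
  have hf : (fun (suma : Int) (i : Int) =>
        if (i, g i).2 = '1' then suma + PySem.List.pyGetD vector (i, g i).1 0 else suma)
      = fun suma i => suma + (if g i = '1' then PySem.List.pyGetD vector i 0 else 0) := by
    funext suma i; split <;> simp
  rw [hf, PySem.List.foldl_add, zero_add]

def pvF (vector : List Int) (s : List Char) (i : Int) : Int :=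
  ((PySem.List.pyRange 0 (vector.length : Int) 1).map
    (fun j => if (if i + j < (s.length : Int) then PySem.List.pyGetD s (i + j) '0' else '1') = '1'
              then PySem.List.pyGetD vector j 0 else 0)).sum

theorem pvAelem (vector : List Int) (s : List Char) (i : Int) :
    (PySem.List.enumerate ((PySem.List.pyRange 0 (vector.length : Int) 1).foldl
        (fun bl j => if i + j < (s.length : Int) then bl ++ [PySem.List.pyGetD s (i + j) '0'] else bl ++ ['1']) [])).foldl
      (fun suma p => if p.2 = '1' then suma + PySem.List.pyGetD vector p.1 0 else suma) 0 = pvF vector s i := by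
  rw [pvAblock_map, pvAsum]
  rfl

theorem pvF_zero (vector : List Int) (s : List Char) : pvF vector s 0 = pvBlockVal vector s := by
  unfold pvF pvBlockVal
  have ht : ((vector.length : Int) - 0).toNat = vector.length := by omega
  rw [PySem.List.pyRange_one, ht, List.map_map]
  congr 1
  apply List.map_congr_left
  intro t _
  simp only [Function.comp_apply, zero_add, PySem.List.pyGetD_natCast]
  have hlt : ((t : Int) < (s.length : Int)) ↔ t < s.length := by omega
  simp only [hlt, pvContrib, pvBitC]
  rfl

theorem pvF_shift (vector : List Int) (s : List Char) (hks : vector.length ≤ s.length) (i : Int)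
    (hi : 0 ≤ i) :
    pvF vector s ((vector.length : Int) + i) = pvF vector (s.drop vector.length) i := by
  unfold pvF
  congr 1
  apply List.map_congr_left
  intro j hj
  have hj' : 0 ≤ j ∧ j < (vector.length : Int) := by
    have := (PySem.List.mem_pyRange_one).mp hj
    omega
  have hlen : ((s.drop vector.length).length : Int) = (s.length : Int) - (vector.length : Int) := by
    simp only [List.length_drop]
    omega
  have hbitEq : (if (vector.length : Int) + i + j < (s.length : Int)
        then PySem.List.pyGetD s ((vector.length : Int) + i + j) '0' else '1')
      = (if i + j < ((s.drop vector.length).length : Int)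
        then PySem.List.pyGetD (s.drop vector.length) (i + j) '0' else '1') := by
    have hcond : ((vector.length : Int) + i + j < (s.length : Int))
        ↔ (i + j < ((s.drop vector.length).length : Int)) := by rw [hlen]; omega
    by_cases hc : i + j < ((s.drop vector.length).length : Int)
    · rw [if_pos (hcond.mpr hc), if_pos hc]
      have hij : 0 ≤ i + j := by omega
      have e2 : i + j = (((i + j).toNat : Nat) : Int) := by omega
      have e1 : (vector.length : Int) + i + j = ((vector.length + (i + j).toNat : Nat) : Int) := by omega
      rw [e2, e1]
      simp only [PySem.List.pyGetD_natCast]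
      rw [pvGetD_drop]
    · rw [if_neg (fun hcc => hc (hcond.mp hcc)), if_neg hc]
  rw [hbitEq]

theorem pvAmain (vector : List Int) (hk : vector ≠ []) :
    ∀ (m : Nat) (s : List Char), s.length ≤ vector.length * m →
      (0 < m → vector.length * (m - 1) < s.length) →
      (List.range m).map (fun (j : Nat) => pvF vector s ((vector.length : Int) * (j : Int))) = pvSpec vector s := by
  have hk' : 0 < vector.length := List.length_pos_of_ne_nil hk
  intro m
  induction m with
  | zero =>
    intro s hs _
    have hsnil : s = [] := List.eq_nil_of_length_eq_zero (by omega)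
    subst hsnil
    simp [pvSpec]
  | succ m ih =>
    intro s hs hlow
    have hlow' : vector.length * m < s.length := by
      have h1 := hlow (Nat.succ_pos m)
      simpa using h1
    have hsnil : s ≠ [] := by
      intro hn
      subst hn
      simp at hlow'
    have hspec : pvSpec vector s = pvBlockVal vector s :: pvSpec vector (s.drop vector.length) := by
      rw [pvSpec]; simp [hsnil, hk]
    rw [List.range_succ_eq_map, List.map_cons, List.map_map, hspec]
    congr 1
    · simpa using pvF_zero vector s
    · by_cases hm : m = 0
      · subst hm
        have hdropnil : s.drop vector.length = [] := by
          rw [List.drop_eq_nil_iff]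
          have h1 : s.length ≤ vector.length * 1 := hs
          omega
        rw [hdropnil]
        simp [pvSpec]
      · have hms2 : vector.length * m = vector.length * (m - 1) + vector.length := by
          obtain ⟨t, rfl⟩ := Nat.exists_eq_succ_of_ne_zero hm
          simp [Nat.mul_succ]
        have hks : vector.length ≤ s.length := by omega
        have hmap : (List.range m).map
              ((fun (j : Nat) => pvF vector s ((vector.length : Int) * (j : Int))) ∘ Nat.succ)
            = (List.range m).map
              (fun (j : Nat) => pvF vector (s.drop vector.length) ((vector.length : Int) * (j : Int))) := by
          apply List.map_congr_left
          intro j _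
          simp only [Function.comp_apply]
          have he : (vector.length : Int) * ((Nat.succ j : Nat) : Int)
              = (vector.length : Int) + (vector.length : Int) * (j : Int) := by push_cast; ring
          rw [he, pvF_shift vector s hks _ (by positivity)]
        have hms : vector.length * (m + 1) = vector.length * m + vector.length := by ring
        rw [hmap, ih (s.drop vector.length) ?_ ?_]
        · rw [List.length_drop]
          omega
        · intro _
          rw [List.length_drop]
          omega

theorem pvCeilBounds (k L : Nat) (hk : 0 < k) :
    L ≤ k * (if (0 : Int) < (L : Int) then (((L : Int) - 0 + (k : Int) - 1) / (k : Int)).toNat else 0) ∧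
    (0 < (if (0 : Int) < (L : Int) then (((L : Int) - 0 + (k : Int) - 1) / (k : Int)).toNat else 0) →
      k * ((if (0 : Int) < (L : Int) then (((L : Int) - 0 + (k : Int) - 1) / (k : Int)).toNat else 0) - 1) < L) := by
  by_cases hL : (0 : Int) < (L : Int)
  · simp only [if_pos hL]
    have hcast : ((L : Int) - 0 + (k : Int) - 1) = ((L + k - 1 : Nat) : Int) := by omega
    rw [hcast, ← Int.natCast_ediv, Int.toNat_natCast]
    constructor
    · have h1 := Nat.div_add_mod (L + k - 1) k
      have hr := Nat.mod_lt (L + k - 1) hk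
      generalize (L + k - 1) / k = q at *
      generalize (L + k - 1) % k = r at *
      omega
    · intro hq
      have h1 := Nat.div_add_mod (L + k - 1) k
      have hr := Nat.mod_lt (L + k - 1) hk
      generalize (L + k - 1) / k = q at *
      generalize (L + k - 1) % k = r at *
      obtain ⟨q', rfl⟩ := Nat.exists_eq_succ_of_ne_zero (Nat.pos_iff_ne_zero.mp hq)
      rw [Nat.succ_sub_one, Nat.mul_succ] at *
      omega
  · simp only [if_neg hL]
    have hL0 : L = 0 := by omega
    simp [hL0]

theorem knapsackcipher_A_eq_spec (vector : List Int) (texto : String)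
    (h : vector ≠ []) :
    knapsackcipher vector texto =
      pvSpec vector (pvBits texto) := by
  have hk' : 0 < vector.length := List.length_pos_of_ne_nil h
  have hkI : (0 : Int) < (vector.length : Int) := by exact_mod_cast hk'
  simp only [knapsackcipher]
  rw [pvBitsEq texto]
  rw [PySem.List.foldl_append_singleton_eq_map, PySem.List.foldl_append_singleton_eq_map]
  rw [List.nil_append, List.nil_append, List.map_map]
  rw [PySem.List.pyRange_of_pos 0 ((pvBits texto).length : Int) hkI, List.map_map]
  have hbounds := pvCeilBounds vector.length (pvBits texto).length hk'
  refine Eq.trans (List.map_congr_left ?_)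
    (pvAmain vector h _ (pvBits texto) hbounds.1 hbounds.2)
  intro t ht
  simp only [Function.comp_apply, zero_add]
  exact pvAelem vector (pvBits texto) _

theorem knapsackcipher_B_eq_spec (vector : List Int) (texto : String)
    (h : vector ≠ []) :
    knapsackcipher_alt vector texto =
      pvSpec vector (pvBits texto) := by
  have hk' : 0 < vector.length := List.length_pos_of_ne_nil h
  have hkI : (0 : Int) < (vector.length : Int) := by exact_mod_cast hk'
  have hbits : pvBits texto = ((PySem.Chars.upper texto.toList).filter
      (fun c => decide ('A' ≤ c ∧ c ≤ 'Z'))).flatMap (fun c => pvFormat08b ((c.toNat : Int))) := rfl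
  simp only [knapsackcipher_alt]
  rw [← hbits]
  have hq := (PySem.Int.neg_floordiv_neg_eq_iff_of_pos
      (a := ((pvBits texto).length : Int))
      (q := -(PySem.Int.floordiv (-((pvBits texto).length : Int)) (vector.length : Int))) hkI).mp rfl
  have h3 := hq.1
  rw [sub_mul, one_mul] at h3
  have hM := pvBmain vector h (pvBits texto).length (pvBits texto) le_rfl
      ((vector.length : Int) * -(PySem.Int.floordiv (-((pvBits texto).length : Int)) (vector.length : Int))) []
      ⟨_, rfl⟩ (by rw [mul_comm]; exact hq.2) (by rw [mul_comm]; linarith)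
  show ((PySem.List.pyRange 0 ((vector.length : Int) *
      -(PySem.Int.floordiv (-((pvBits texto).length : Int)) (vector.length : Int))) 1).foldl
        (pvBody vector (pvBits texto)) ([], 0)).1 = pvSpec vector (pvBits texto)
  rw [hM]
  simp

-- ===== VERDICT (by name: the statement is the Claim_ definition above) =====
theorem knapsackcipher_spec : Claim_equal_knapsackcipher := by
  intro vector texto _ hpre
  unfold Spec_knapsackcipher
  rw [knapsackcipher_A_eq_spec vector texto hpre, knapsackcipher_B_eq_spec vector texto hpre]
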